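-- pv_equiv track=rewrite | github.com/alexandraback/datacollection | solutions_5631989306621952_1/Python/gugugu/the_last_word.py | _solve
-- ===== SOURCE A (Python) =====
-- def _solve(inp):
--     if inp == '':
--         return ''
--     mx = max(inp)
--     first = inp.index(mx)
--     last = len(inp) - 1 - (inp[::-1]).index(mx)
--     mxs = ''
--     rest = ''
--     for l in inp[first:(last+1)]:
--         if l == mx:
--             mxs += l
--         else:
--             rest += l
--     return mxs + _solve(inp[:first]) + rest + inp[(last+1):]
-- ===== SOURCE B (Python) =====
-- def _solve(inp):
--     # One pass: prepend (via a reversed front list) when the char is >= the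
--     # current first char, else append; front's last element is always the running max.
--     front = []
--     back = []
--     for c in inp:
--         if not front or c >= front[-1]:
--             front.append(c)
--         else:
--             back.append(c)
--     return ''.join(reversed(front)) + ''.join(back)
-- ===== Notes on version B (the rewrite author's own statement) =====
-- stated objective: alternative
-- what changed: Replaces the recursive max/first-last-occurrence/slice decomposition with a single left-to-right greedy pass that prepends a char when it is >= the current first char (tracked via a reversed front list) and appends otherwise.
import Mathlib
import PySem

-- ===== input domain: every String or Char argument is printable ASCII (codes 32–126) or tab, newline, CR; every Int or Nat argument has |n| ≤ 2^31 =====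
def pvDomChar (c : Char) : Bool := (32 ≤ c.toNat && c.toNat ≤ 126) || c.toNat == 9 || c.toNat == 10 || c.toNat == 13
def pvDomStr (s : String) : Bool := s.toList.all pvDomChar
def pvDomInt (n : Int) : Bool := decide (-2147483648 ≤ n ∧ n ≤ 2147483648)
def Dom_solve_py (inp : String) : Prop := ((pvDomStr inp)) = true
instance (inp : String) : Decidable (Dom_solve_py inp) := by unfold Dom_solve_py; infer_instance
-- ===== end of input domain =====

-- B changes the algorithm: one greedy left-to-right pass (prepend when the char is
-- >= the current first char, else append) instead of A's recursive
-- max/first-last-occurrence decomposition (objective: alternative).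

-- ===== PORT A =====
-- literal port of A over List Char (Python strings port via .toList, PySem.Chars style)
def solveA (l : List Char) : List Char :=
  if l = [] then []
  else
    match _hm : PySem.List.max? l (fun c => c) with
    | none => []   -- unreachable: max? = none ↔ l = []
    | some mx =>
      match _hf : PySem.List.index? l mx with
      | none => []  -- unreachable: mx ∈ l
      | some first =>
        match _hr : PySem.List.index? l.reverse mx with
        | none => []  -- unreachable
        | some ridx =>
          let last : Int := (l.length : Int) - 1 - (ridx : Int)
          let seg := PySem.List.slice l (some (first : Int)) (some (last + 1))
          let p := seg.foldl
            (fun (st : List Char × List Char) c =>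
              if c = mx then (st.1 ++ [c], st.2) else (st.1, st.2 ++ [c])) ([], [])
          p.1 ++ solveA (PySem.List.slice l none (some (first : Int))) ++ p.2 ++
            PySem.List.slice l (some (last + 1)) none
termination_by l.length
decreasing_by
  have hfirst : first < l.length := by
    obtain ⟨hk, _, _⟩ := PySem.List.getElem_of_index?_eq_some _hf
    exact hk
  simp [PySem.List.slice_to_natCast]
  omega

def solve_py (inp : String) : String := String.ofList (solveA inp.toList)

-- ===== PORT B =====
def stepB (st : List Char × List Char) (c : Char) : List Char × List Char :=
  match st.1.getLast? with
  | none => (st.1 ++ [c], st.2)                -- 'not front'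
  | some x => if x ≤ c then (st.1 ++ [c], st.2) else (st.1, st.2 ++ [c])

def solve_py_alt (inp : String) : String :=
  let st := inp.toList.foldl stepB ([], [])
  String.ofList (st.1.reverse ++ st.2)

-- ===== PRECONDITION & SPEC =====
def Spec_solve_py (inp : String) (out : String) : Prop := out = solve_py_alt inp
instance (inp : String) (out : String) : Decidable (Spec_solve_py inp out) := by unfold Spec_solve_py; infer_instance

-- ===== CLAIM (what is proved, stated in full; the proofs are below) =====
def Claim_equal_solve_py : Prop := ∀ (inp : String), Dom_solve_py inp → Spec_solve_py inp (solve_py inp)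

-- ===== LEMMAS AND PROOFS =====


-- anything prepended onto the front list comes from the initial front or the input
theorem stepB_front_mem : ∀ (l : List Char) (f b : List Char) (x : Char),
    x ∈ (l.foldl stepB (f, b)).1 → x ∈ f ∨ x ∈ l := by
  intro l
  induction l with
  | nil => intro f b x h; exact Or.inl h
  | cons c t ih =>
    intro f b x h
    simp only [List.foldl_cons] at h
    unfold stepB at h
    rcases hg : f.getLast? with _ | y <;> simp only [hg] at h
    · rcases ih _ _ _ h with h1 | h1
      · rcases List.mem_append.mp h1 with h2 | h2
        · exact Or.inl h2
        · simp at h2; simp [h2]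
      · simp [h1]
    · split at h
      · rcases ih _ _ _ h with h1 | h1
        · rcases List.mem_append.mp h1 with h2 | h2
          · exact Or.inl h2
          · simp at h2; simp [h2]
        · simp [h1]
      · rcases ih _ _ _ h with h1 | h1
        · exact Or.inl h1
        · simp [h1]

-- while the running front-max is mx and every incoming char is ≤ mx:
-- chars equal to mx are prepended, the rest appended
theorem foldl_stepB_all_le (mx : Char) : ∀ (seg f b : List Char),
    f.getLast? = some mx → (∀ c ∈ seg, c ≤ mx) →
    seg.foldl stepB (f, b) =
      (f ++ seg.filter (fun c => c == mx), b ++ seg.filter (fun c => !(c == mx))) := by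
  intro seg
  induction seg with
  | nil => intro f b _ _; simp
  | cons c t ih =>
    intro f b hg hle
    have hcle : c ≤ mx := hle c (by simp)
    by_cases hc : c = mx
    · subst hc
      have hstep : stepB (f, b) c = (f ++ [c], b) := by
        unfold stepB; simp [hg]
      simp only [List.foldl_cons, hstep]
      rw [ih (f ++ [c]) b (by simp) (fun d hd => hle d (by simp [hd]))]
      simp
    · have hlt : ¬ mx ≤ c := not_le.mpr (lt_of_le_of_ne hcle hc)
      have hstep : stepB (f, b) c = (f, b ++ [c]) := by
        unfold stepB; simp [hg, hlt]
      simp only [List.foldl_cons, hstep]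
      rw [ih f (b ++ [c]) hg (fun d hd => hle d (by simp [hd]))]
      simp [hc]

-- once every remaining char is < the running front-max, everything is appended
theorem foldl_stepB_all_lt (mx : Char) : ∀ (t f b : List Char),
    f.getLast? = some mx → (∀ c ∈ t, ¬ mx ≤ c) →
    t.foldl stepB (f, b) = (f, b ++ t) := by
  intro t
  induction t with
  | nil => intro f b _ _; simp
  | cons c u ih =>
    intro f b hg hlt
    have hstep : stepB (f, b) c = (f, b ++ [c]) := by
      unfold stepB; simp [hg, hlt c (by simp)]
    simp only [List.foldl_cons, hstep]
    rw [ih f (b ++ [c]) hg (fun d hd => hlt d (by simp [hd]))]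
    simp

-- A's inner loop is a pair of filters
theorem loopA (mx : Char) : ∀ (seg a b : List Char),
    seg.foldl (fun (st : List Char × List Char) c =>
        if c = mx then (st.1 ++ [c], st.2) else (st.1, st.2 ++ [c])) (a, b) =
      (a ++ seg.filter (fun c => c == mx), b ++ seg.filter (fun c => !(c == mx))) := by
  intro seg
  induction seg with
  | nil => intro a b; simp
  | cons c t ih =>
    intro a b
    by_cases hc : c = mx
    · rw [List.foldl_cons, if_pos hc, ih (a ++ [c]) b]
      simp [hc]
    · rw [List.foldl_cons, if_neg hc, ih a (b ++ [c])]
      simp [hc]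

theorem getLast?_append_cons_all (mx : Char) : ∀ (fl f : List Char),
    (∀ c ∈ fl, c = mx) → (f ++ mx :: fl).getLast? = some mx := by
  intro fl
  induction fl with
  | nil => intro f _; simp
  | cons c t ih =>
    intro f hall
    have hc : c = mx := hall c (by simp)
    subst hc
    have : f ++ c :: c :: t = (f ++ [c]) ++ c :: t := by simp
    rw [this, ih (f ++ [c]) (fun d hd => hall d (by simp [hd]))]

theorem cons_all_comm (mx : Char) : ∀ (F X : List Char),
    (∀ c ∈ F, c = mx) → mx :: (F ++ X) = F ++ mx :: X := by
  intro F
  induction F with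
  | nil => intro X _; rfl
  | cons c t ih =>
    intro X h
    have hc : c = mx := h c (by simp)
    subst hc
    simp only [List.cons_append]
    exact congrArg (List.cons c) (ih X (fun d hd => h d (by simp [hd])))

theorem reverse_all_eq (mx : Char) (xs : List Char) (h : ∀ c ∈ xs, c = mx) :
    xs.reverse = xs := by
  rw [List.eq_replicate_of_mem h]
  simp

theorem solveA_eq_greedy_aux : ∀ (n : Nat) (l : List Char), l.length ≤ n →
    solveA l = (l.foldl stepB ([], [])).1.reverse ++ (l.foldl stepB ([], [])).2 := by
  intro n
  induction n with
  | zero =>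
    intro l hl
    have : l = [] := List.eq_nil_of_length_eq_zero (Nat.le_zero.mp hl)
    subst this
    rw [solveA]; simp
  | succ n ih =>
    intro l hl
    rw [solveA]
    split
    · rename_i hnil; subst hnil; simp
    rename_i hnil
    split
    · rename_i hm; exact absurd ((PySem.List.max?_eq_none_iff l _).mp hm) hnil
    rename_i mx hm
    split
    · rename_i hf
      exact absurd ((PySem.List.index?_eq_none_iff l mx).mp hf) (by simp [PySem.List.max?_mem hm])
    rename_i first hf
    split
    · rename_i hr
      have : mx ∈ l.reverse := by simp [PySem.List.max?_mem hm]
      exact absurd ((PySem.List.index?_eq_none_iff l.reverse mx).mp hr) (by simp [this])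
    rename_i ridx hr
    -- facts from max/index
    have hle : ∀ y ∈ l, y ≤ mx := fun y hy => PySem.List.max?_isMax hm y hy
    obtain ⟨hk1, hl1, hfmin⟩ := PySem.List.getElem_of_index?_eq_some hf
    obtain ⟨hk2, hl2, hrmin⟩ := PySem.List.getElem_of_index?_eq_some hr
    rw [List.length_reverse] at hk2
    rw [List.getElem_reverse] at hl2
    have hfirstle : first ≤ l.length - 1 - ridx := by
      by_contra h
      push Not at h
      exact hfmin _ (by omega) hl2
    have hfB : first < l.length - ridx := by omega
    have hBle : l.length - ridx ≤ l.length := by omega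
    have hlast1 : ((l.length : Int) - 1 - (ridx : Int) + 1) = ((l.length - ridx : Nat) : Int) := by
      push_cast [Nat.cast_sub (by omega : ridx ≤ l.length)]
      ring
    -- slice values
    have hsl1 : PySem.List.slice l none (some ((first : Nat) : Int)) = l.take first :=
      PySem.List.slice_to_natCast l first
    have hsl2 : PySem.List.slice l (some ((first : Nat) : Int)) (some ((l.length - ridx : Nat) : Int)) =
        (l.drop first).take (l.length - ridx - first) :=
      PySem.List.slice_natCast l first (l.length - ridx)
    have hsl3 : PySem.List.slice l (some ((l.length - ridx : Nat) : Int)) none = l.drop (l.length - ridx) :=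
      PySem.List.slice_from_natCast l (l.length - ridx)
    have hdropfirst : l.drop first = mx :: l.drop (first + 1) := by
      rw [List.drop_eq_getElem_cons hk1, hl1]
    have hsegcons : (l.drop first).take (l.length - ridx - first) =
        mx :: (l.drop (first + 1)).take (l.length - ridx - first - 1) := by
      rw [hdropfirst, show l.length - ridx - first = (l.length - ridx - first - 1) + 1 by omega]
      rfl
    have hdecomp : l = l.take first ++ ((l.drop first).take (l.length - ridx - first) ++ l.drop (l.length - ridx)) := by
      rw [← List.append_assoc, ← List.take_add, show first + (l.length - ridx - first) = l.length - ridx by omega,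
        List.take_append_drop]
    -- membership facts
    have hsegtle : ∀ c ∈ (l.drop (first + 1)).take (l.length - ridx - first - 1), c ≤ mx :=
      fun c hc => hle c (List.mem_of_mem_drop (List.mem_of_mem_take hc))
    have hnotmx : mx ∉ l.drop (l.length - ridx) := by
      intro hmem
      obtain ⟨j, hj, hjeq⟩ := List.mem_iff_getElem.mp hmem
      have hjlen : j < ridx := by
        have := List.length_drop (l := l) (i := l.length - ridx)
        omega
      have h1 : (l.drop (l.length - ridx))[j] = l[l.length - ridx + j]'(by omega) :=
        List.getElem_drop
      have h2 : l.reverse[ridx - 1 - j]'(by rw [List.length_reverse]; omega) =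
          l[l.length - 1 - (ridx - 1 - j)]'(by omega) := List.getElem_reverse _
      have h3 : l[l.length - 1 - (ridx - 1 - j)]'(by omega) = l[l.length - ridx + j]'(by omega) :=
        getElem_congr rfl (by omega) (by omega)
      have h4 := hrmin (ridx - 1 - j) (by omega)
      rw [h2, h3] at h4
      exact h4 (by rw [← h1]; exact hjeq)
    have hdroplt : ∀ c ∈ l.drop (l.length - ridx), ¬ mx ≤ c := by
      intro c hc hle2
      have hcle : c ≤ mx := hle c (List.mem_of_mem_drop hc)
      exact hnotmx (le_antisymm hle2 hcle ▸ hc)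
    -- B side
    have hst1mem : ∀ x ∈ ((l.take first).foldl stepB ([], [])).1, x ∈ l := by
      intro x hx
      rcases stepB_front_mem (l.take first) [] [] x hx with h | h
      · simp at h
      · exact List.mem_of_mem_take h
    have hstepmx : stepB ((l.take first).foldl stepB ([], [])) mx =
        (((l.take first).foldl stepB ([], [])).1 ++ [mx], ((l.take first).foldl stepB ([], [])).2) := by
      rcases hgl : ((l.take first).foldl stepB ([], [])).1.getLast? with _ | x
      · simp [stepB, hgl]
      · have : x ≤ mx := hle x (hst1mem x (List.mem_of_getLast? hgl))
        simp [stepB, hgl, this]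
    have hfiltmem : ∀ c ∈ ((l.drop (first + 1)).take (l.length - ridx - first - 1)).filter (fun c => c == mx), c = mx := by
      intro c hc
      have := (List.mem_filter.mp hc).2
      simpa using this
    have hglast : ((((l.take first).foldl stepB ([], [])).1 ++ [mx]) ++
        ((l.drop (first + 1)).take (l.length - ridx - first - 1)).filter (fun c => c == mx)).getLast? = some mx := by
      rw [List.append_assoc]
      exact getLast?_append_cons_all mx _ _ hfiltmem
    have hfold : l.foldl stepB ([], []) =
        ((((l.take first).foldl stepB ([], [])).1 ++ [mx]) ++
            ((l.drop (first + 1)).take (l.length - ridx - first - 1)).filter (fun c => c == mx),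
          (((l.take first).foldl stepB ([], [])).2 ++
            ((l.drop (first + 1)).take (l.length - ridx - first - 1)).filter (fun c => !(c == mx))) ++
            l.drop (l.length - ridx)) := by
      conv_lhs => rw [hdecomp]
      rw [List.foldl_append, List.foldl_append, hsegcons, List.foldl_cons, hstepmx,
        foldl_stepB_all_le mx _ _ _ (by simp) hsegtle,
        foldl_stepB_all_lt mx _ _ _ hglast hdroplt]
    -- IH on the prefix
    have hih : solveA (l.take first) =
        ((l.take first).foldl stepB ([], [])).1.reverse ++ ((l.take first).foldl stepB ([], [])).2 := by
      apply ih
      have : (l.take first).length = min first l.length := List.length_take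
      omega
    -- put it together
    simp only [hlast1, hsl1, hsl2, hsl3, loopA, hfold, hih, List.nil_append]
    rw [hsegcons, List.filter_cons, List.filter_cons]
    simp only [BEq.refl, Bool.not_true, if_pos, if_neg, Bool.false_eq_true, not_false_eq_true,
      List.reverse_append]
    rw [reverse_all_eq mx _ hfiltmem]
    simp only [List.append_assoc, List.cons_append]
    exact cons_all_comm mx _ _ hfiltmem

-- ===== VERDICT (by name: the statement is the Claim_ definition above) =====
theorem solve_py_spec : Claim_equal_solve_py := by
  intro inp _
  unfold Spec_solve_py solve_py solve_py_alt
  rw [solveA_eq_greedy_aux inp.toList.length inp.toList le_rfl]
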